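-- pv_equiv track=rewrite | github.com/114514ggb/ATRI-bot | atribot/core/db/atri_async_postgresql.py | _convert_query_placeholders
-- ===== SOURCE A (Python) =====
-- def _convert_query_placeholders(query: str) -> str:
--     """将 %s 占位符转换为 $1, $2 格式"""
--     parts = query.split('%s')
--     if len(parts) == 1:
--         return query
--
--     new_parts = []
--     for i, part in enumerate(parts):
--         new_parts.append(part)
--         if i < len(parts) - 1:
--             new_parts.append(f"${i+1}")
--
--     return ''.join(new_parts)
-- ===== SOURCE B (Python) =====
-- def _convert_query_placeholders(query: str) -> str:
--     """将 %s 占位符转换为 $1, $2 格式"""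
--     out = []
--     i, n = 0, 1
--     while i < len(query):
--         if query.startswith('%s', i):
--             out.append(f"${n}")
--             n += 1
--             i += 2
--         else:
--             out.append(query[i])
--             i += 1
--     return ''.join(out)
-- ===== Notes on version B (the rewrite author's own statement) =====
-- stated objective: simpler
-- what changed: Replaces the split/enumerate/append/join reassembly (with its separate no-placeholder early return) by a single left-to-right scan that copies characters and emits a numbered placeholder from a running counter at each match.
import Mathlib
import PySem

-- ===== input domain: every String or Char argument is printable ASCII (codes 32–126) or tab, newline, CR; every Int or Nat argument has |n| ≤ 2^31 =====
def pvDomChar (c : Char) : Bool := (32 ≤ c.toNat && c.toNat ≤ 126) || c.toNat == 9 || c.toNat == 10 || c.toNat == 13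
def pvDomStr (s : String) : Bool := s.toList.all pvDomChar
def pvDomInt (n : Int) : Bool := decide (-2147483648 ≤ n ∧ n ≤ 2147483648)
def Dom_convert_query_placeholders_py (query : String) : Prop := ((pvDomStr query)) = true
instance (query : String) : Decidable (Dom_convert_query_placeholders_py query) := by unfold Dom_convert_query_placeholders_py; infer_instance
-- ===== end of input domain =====

-- B replaces A's split('%s') + enumerate/append/join reassembly (with its separate no-placeholder early
-- return) by a single left-to-right scan with a running counter; both are linear, B is plainer.

-- ===== PORT A =====
-- parts = query.split('%s'); if len(parts) == 1 return query; else interleave parts with $1,$2,… and join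
def convert_query_placeholders_py (query : String) : String :=
  match PySem.Str.split? query "%s" with
  | none => query   -- unreachable: the separator "%s" is nonempty
  | some parts =>
    if parts.length == 1 then query
    else
      let new_parts := (PySem.List.enumerate parts).foldl
        (fun acc iv =>
          let acc := acc ++ [iv.2]
          if iv.1 < (parts.length : Int) - 1 then acc ++ ["$" ++ PySem.Int.toStr (iv.1 + 1)] else acc)
        ([] : List String)
      PySem.Str.join "" new_parts

-- ===== PORT B =====
-- Source B's while-loop: at each cursor either consume '%s' and emit '$'+str(n), or copy one character
def scanPS : List Char → Int → List Char
  | '%' :: 's' :: rest, n => '$' :: (PySem.Int.toChars n ++ scanPS rest (n + 1))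
  | c :: rest, n => c :: scanPS rest n
  | [], _ => []

def convert_query_placeholders_py_alt (query : String) : String :=
  String.ofList (scanPS query.toList 1)

-- ===== PRECONDITION & SPEC =====
def Spec_convert_query_placeholders_py (query : String) (out : String) : Prop := out = convert_query_placeholders_py_alt query
instance (query : String) (out : String) : Decidable (Spec_convert_query_placeholders_py query out) := by unfold Spec_convert_query_placeholders_py; infer_instance

-- ===== CLAIM (what is proved, stated in full; the proofs are below) =====
def Claim_equal_convert_query_placeholders_py : Prop := ∀ (query : String), Dom_convert_query_placeholders_py query → Spec_convert_query_placeholders_py query (convert_query_placeholders_py query)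

-- ===== LEMMAS AND PROOFS =====

-- prepend to the first piece (the shape of splitOn's accumulator step)
def mapHead (p : List Char) : List (List Char) → List (List Char)
  | [] => [p]
  | x :: xs => (p ++ x) :: xs

-- clean structural characterisation of query.split('%s'), on char lists
def splitPS : List Char → List (List Char)
  | '%' :: 's' :: rest => [] :: splitPS rest
  | c :: rest => mapHead [c] (splitPS rest)
  | [] => [[]]

-- parts interleaved with '$'·str(s+1), on char lists
def interC : List (List Char) → Int → List (List Char)
  | [], _ => []
  | [p], _ => [p]
  | p :: ps, s => p :: ('$' :: PySem.Int.toChars (s + 1)) :: interC ps (s + 1)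

-- parts interleaved with "$"++str(s+1): what A's foldl loop builds
def interS : List String → Int → List String
  | [], _ => []
  | [p], _ => [p]
  | p :: ps, s => p :: ("$" ++ PySem.Int.toStr (s + 1)) :: interS ps (s + 1)

theorem scanPS_cons (c : Char) (rest : List Char) (n : Int)
    (h : ∀ r, c = '%' → rest = 's' :: r → False) :
    scanPS (c :: rest) n = c :: scanPS rest n := by
  rw [scanPS.eq_def]
  split
  · rename_i r heq
    injection heq with h1 h2
    exact (h r h1 h2).elim
  · rename_i c' r' heq
    injection heq with h1 h2
    rw [h1, h2]
  · rename_i heq; exact absurd heq (by simp)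

theorem splitPS_ne_nil (cs : List Char) : splitPS cs ≠ [] := by
  induction cs using splitPS.induct with
  | case1 rest ih => simp [splitPS]
  | case2 c rest h ih => cases hs : splitPS rest <;> simp [splitPS, hs, mapHead]
  | case3 => simp [splitPS]

theorem mapHead_mapHead (p q : List Char) (ps : List (List Char)) :
    mapHead p (mapHead q ps) = mapHead (p ++ q) ps := by
  cases ps <;> simp [mapHead]

theorem splitPS_cons (c : Char) (rest : List Char)
    (h : ∀ r, c = '%' → rest = 's' :: r → False) :
    splitPS (c :: rest) = mapHead [c] (splitPS rest) := by
  rw [splitPS.eq_def]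
  split
  · rename_i r heq
    injection heq with h1 h2
    exact (h r h1 h2).elim
  · rename_i c' r' heq
    injection heq with h1 h2
    rw [h1, h2]
  · rename_i heq; exact absurd heq (by simp)

theorem go_spec : ∀ (n : Nat) (l cur : List Char) (acc : List (List Char)), l.length < n →
    PySem.Chars.splitOn.go ['%', 's'] n l cur acc = acc.reverse ++ mapHead cur.reverse (splitPS l) := by
  intro n
  induction n with
  | zero => intro l cur acc h; omega
  | succ m ih =>
    intro l cur acc h
    match l with
    | [] =>
      rw [PySem.Chars.splitOn.go]
      all_goals simp [splitPS, mapHead]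
    | c :: rest =>
      rw [PySem.Chars.splitOn.go]
      by_cases hp : ['%','s'].isPrefixOf (c :: rest) = true
      · obtain ⟨r, hc, hr⟩ : ∃ r, c = '%' ∧ rest = 's' :: r := by
          cases rest with
          | nil => simp [List.isPrefixOf] at hp
          | cons d rs =>
            simp [List.isPrefixOf] at hp
            exact ⟨rs, hp.1.symm, by rw [← hp.2]⟩
        subst hc; subst hr
        rw [if_pos hp]
        have hlen : r.length < m := by simp at h ⊢; omega
        rw [show List.drop (['%','s'].length) ('%'::'s'::r) = r from rfl, ih r [] _ hlen]
        rw [show splitPS ('%'::'s'::r) = [] :: splitPS r from by rw [splitPS]]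
        cases hq : splitPS r with
        | nil => exact absurd hq (splitPS_ne_nil r)
        | cons q qs => simp [mapHead]
      · rw [if_neg hp]
        have hlen : rest.length < m := by simp at h; omega
        rw [ih rest (c :: cur) acc hlen]
        have hnm : ∀ r, c = '%' → rest = 's' :: r → False := by
          intro r h1 h2; subst h1; subst h2; simp [List.isPrefixOf] at hp
        rw [splitPS_cons c rest hnm, mapHead_mapHead]
        simp

theorem splitOn_eq (cs : List Char) : PySem.Chars.splitOn cs ['%', 's'] = splitPS cs := by
  rw [PySem.Chars.splitOn, go_spec (cs.length + 1) cs [] [] (by omega)]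
  cases hq : splitPS cs with
  | nil => exact absurd hq (splitPS_ne_nil cs)
  | cons q qs => simp [mapHead]

theorem splitPS_singleton (cs p : List Char) (h : splitPS cs = [p]) : p = cs := by
  induction cs using splitPS.induct generalizing p with
  | case1 rest ih => exact absurd (by simpa [splitPS] using congrArg List.tail h) (splitPS_ne_nil rest)
  | case2 c rest hne ih =>
    rw [splitPS_cons c rest hne] at h
    cases hs : splitPS rest with
    | nil => exact absurd hs (splitPS_ne_nil rest)
    | cons q qs =>
      rw [hs] at h
      simp only [mapHead, List.cons.injEq] at h
      obtain ⟨hp, hqs⟩ := h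
      rw [← hp, List.singleton_append, ih q (by rw [hs, hqs])]
  | case3 => simpa [splitPS] using h.symm


theorem interC_mapHead (c : Char) (ps : List (List Char)) (s : Int) (h : ps ≠ []) :
    interC (mapHead [c] ps) s = mapHead [c] (interC ps s) := by
  match ps with
  | [p] => simp [interC, mapHead]
  | p :: q :: ps => simp [interC, mapHead]

theorem flatten_mapHead (c : Char) (L : List (List Char)) :
    (mapHead [c] L).flatten = c :: L.flatten := by
  cases L <;> simp [mapHead]

theorem flatten_interC (cs : List Char) (s : Int) :
    (interC (splitPS cs) s).flatten = scanPS cs (s + 1) := by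
  induction cs using splitPS.induct generalizing s with
  | case1 rest ih =>
    rw [show splitPS ('%'::'s'::rest) = [] :: splitPS rest from by rw [splitPS], scanPS]
    cases hq : splitPS rest with
    | nil => exact absurd hq (splitPS_ne_nil rest)
    | cons q qs =>
      simp only [interC, List.flatten_cons, List.nil_append]
      rw [← hq, ih (s + 1)]; simp
  | case2 c rest hne ih =>
    rw [splitPS_cons c rest hne, interC_mapHead c _ s (splitPS_ne_nil rest), flatten_mapHead,
      ih s, scanPS_cons c rest (s + 1) hne]
  | case3 => simp [splitPS, interC, scanPS]

theorem scanPS_id (cs : List Char) (h : splitPS cs = [cs]) (n : Int) : scanPS cs n = cs := by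
  have := flatten_interC cs (n - 1)
  rw [h] at this
  simpa [interC] using this.symm

theorem foldl_enum (T : Int) :
    ∀ (xs : List String) (s : Int) (acc : List String), s + xs.length = T →
    (PySem.List.enumerate xs s).foldl
      (fun acc iv =>
        let acc := acc ++ [iv.2]
        if iv.1 < T - 1 then acc ++ ["$" ++ PySem.Int.toStr (iv.1 + 1)] else acc) acc
      = acc ++ interS xs s := by
  intro xs
  induction xs with
  | nil => intro s acc h; simp [PySem.List.enumerate, interS]
  | cons x rest ih =>
    intro s acc h
    rw [PySem.List.enumerate_cons, List.foldl_cons]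
    cases rest with
    | nil =>
      have : ¬ (s < T - 1) := by simp at h; omega
      simp [PySem.List.enumerate, interS, this]
    | cons y rs =>
      have hlt : s < T - 1 := by simp at h; omega
      rw [ih (s + 1) _ (by simp at h ⊢; omega)]
      simp [interS, hlt]

theorem interS_toList (ps : List (List Char)) (s : Int) :
    (interS (ps.map String.ofList) s).map String.toList = interC ps s := by
  induction ps generalizing s with
  | nil => simp [interS, interC]
  | cons p rest ih =>
    cases rest with
    | nil => simp [interS, interC]
    | cons q rs =>
      simp only [List.map_cons, interS, interC, List.map_cons] at *
      rw [ih]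
      simp [PySem.Int.toList_toStr]

theorem join_nil_sep (l : List (List Char)) : PySem.Chars.join [] l = l.flatten := by
  induction l with
  | nil => rfl
  | cons x rest ih =>
    cases rest with
    | nil => simp [PySem.Chars.join, List.intercalate]
    | cons y rs =>
      simp only [PySem.Chars.join, List.intercalate] at *
      simp [List.intersperse, ih]

-- ===== VERDICT (by name: the statement is the Claim_ definition above) =====
theorem convert_query_placeholders_py_spec : Claim_equal_convert_query_placeholders_py := by
  intro query _hdom
  unfold Spec_convert_query_placeholders_py
  have hsplit : PySem.Str.split? query "%s" = some ((splitPS query.toList).map String.ofList) := by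
    rw [PySem.Str.split?]
    rw [show ("%s" : String).toList = ['%','s'] from rfl]
    rw [PySem.Chars.split?, if_neg (by simp), splitOn_eq]
    rfl
  rw [convert_query_placeholders_py, hsplit]
  simp only
  by_cases h1 : ((splitPS query.toList).map String.ofList).length == 1
  · rw [if_pos h1]
    obtain ⟨p, hp⟩ : ∃ p, splitPS query.toList = [p] := by
      simp at h1
      match hs : splitPS query.toList, h1 with
      | [p], _ => exact ⟨p, rfl⟩
    rw [convert_query_placeholders_py_alt, scanPS_id _ (by rw [hp, splitPS_singleton _ _ hp]) 1]
    apply String.toList_inj.mp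
    simp
  · rw [if_neg h1]
    apply String.toList_inj.mp
    rw [PySem.Str.toList_join,
      foldl_enum (((splitPS query.toList).map String.ofList).length : Int) _ 0 [] (by simp),
      List.nil_append]
    rw [show ("" : String).toList = [] from rfl, join_nil_sep, interS_toList, flatten_interC]
    rw [convert_query_placeholders_py_alt]
    simp
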